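-- pv_equiv track=rewrite | github.com/apratimm07/lab | robot.py | move_towards_goal
-- ===== SOURCE A (Python) =====
-- def move_towards_goal(start, goal, grid=(5, 5)):
--     x, y = start
--     gx, gy = goal
--     path = [(x, y)]
--     actions = []
--     cost = 0
--
--     while (x, y) != (gx, gy):
--         if x < gx:
--             x += 1
--             actions.append("DOWN")
--         elif x > gx:
--             x -= 1
--             actions.append("UP")
--         elif y < gy:
--             y += 1
--             actions.append("RIGHT")
--         elif y > gy:
--             y -= 1
--             actions.append("LEFT")
--
--         path.append((x, y))
--         cost += 1
--
--     return path, actions, cost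
-- ===== SOURCE B (Python) =====
-- def move_towards_goal(start, goal, grid=(5, 5)):
--     x, y = start
--     gx, gy = goal
--     dx = gx - x
--     dy = gy - y
--     if dx > 0:
--         xcells = [(x + i + 1, y) for i in range(dx)]
--         xacts = ["DOWN"] * dx
--     else:
--         xcells = [(x - i - 1, y) for i in range(-dx)]
--         xacts = ["UP"] * (-dx)
--     if dy > 0:
--         ycells = [(gx, y + j + 1) for j in range(dy)]
--         yacts = ["RIGHT"] * dy
--     else:
--         ycells = [(gx, y - j - 1) for j in range(-dy)]
--         yacts = ["LEFT"] * (-dy)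
--     return [(x, y)] + xcells + ycells, xacts + yacts, abs(dx) + abs(dy)
-- ===== Notes on version B (the rewrite author's own statement) =====
-- stated objective: alternative
-- what changed: Replaced the branch-selecting while loop that steps one cell at a time until reaching the goal with a direct construction from the deltas dx, dy: the x-leg and y-leg cells are built as comprehensions over range(|dx|)/range(|dy|), actions as replicated string lists, and cost is |dx|+|dy| in closed form.
import Mathlib
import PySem

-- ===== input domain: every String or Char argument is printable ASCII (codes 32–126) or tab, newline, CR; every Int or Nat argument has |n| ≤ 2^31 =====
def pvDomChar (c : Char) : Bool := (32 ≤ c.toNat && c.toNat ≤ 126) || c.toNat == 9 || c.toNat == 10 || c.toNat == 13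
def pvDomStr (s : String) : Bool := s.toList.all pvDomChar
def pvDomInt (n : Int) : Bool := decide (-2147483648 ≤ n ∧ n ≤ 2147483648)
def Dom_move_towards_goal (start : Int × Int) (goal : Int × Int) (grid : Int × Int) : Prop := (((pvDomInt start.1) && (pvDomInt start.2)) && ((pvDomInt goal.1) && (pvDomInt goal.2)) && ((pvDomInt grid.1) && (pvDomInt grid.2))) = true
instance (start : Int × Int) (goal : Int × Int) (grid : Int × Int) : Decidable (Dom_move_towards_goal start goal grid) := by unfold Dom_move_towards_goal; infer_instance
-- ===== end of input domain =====

-- ===== PORT A =====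
-- One line of intent: B builds the path directly from the deltas instead of A's step-by-step while loop; same values, proved equal.
-- Literal port of A's while loop: four ordered branches, append new cell, cost += 1.
-- fuel is only a totality guard: it is passed the exact Manhattan distance, which the loop decreases by 1
-- each iteration, so the fuel-0 fallback is reached only when the while-condition is already false.
def move_towards_goal_loop (fuel : Nat) (gx gy x y : Int) (path : List (Int × Int)) (actions : List String) (cost : Int) : (List (Int × Int)) × List String × Int :=
  match fuel with
  | 0 => (path, actions, cost)
  | fuel + 1 =>
    if (x, y) ≠ (gx, gy) then
      if x < gx then
        move_towards_goal_loop fuel gx gy (x + 1) y (path ++ [(x + 1, y)]) (actions ++ ["DOWN"]) (cost + 1)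
      else if x > gx then
        move_towards_goal_loop fuel gx gy (x - 1) y (path ++ [(x - 1, y)]) (actions ++ ["UP"]) (cost + 1)
      else if y < gy then
        move_towards_goal_loop fuel gx gy x (y + 1) (path ++ [(x, y + 1)]) (actions ++ ["RIGHT"]) (cost + 1)
      else
        -- y > gy (the remaining case while (x, y) ≠ (gx, gy))
        move_towards_goal_loop fuel gx gy x (y - 1) (path ++ [(x, y - 1)]) (actions ++ ["LEFT"]) (cost + 1)
    else (path, actions, cost)

def move_towards_goal (start : Int × Int) (goal : Int × Int) (grid : Int × Int) : (List (Int × Int)) × List String × Int :=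
  move_towards_goal_loop ((goal.1 - start.1).natAbs + (goal.2 - start.2).natAbs) goal.1 goal.2 start.1 start.2 [(start.1, start.2)] [] 0

-- ===== PORT B =====
def move_towards_goal_alt (start : Int × Int) (goal : Int × Int) (grid : Int × Int) : (List (Int × Int)) × List String × Int :=
  let x := start.1
  let y := start.2
  let gx := goal.1
  let gy := goal.2
  let dx := gx - x
  let dy := gy - y
  let xcells : List (Int × Int) :=
    if dx > 0 then (List.range dx.toNat).map (fun (i : Nat) => (x + (i : Int) + 1, y))
    else (List.range (-dx).toNat).map (fun (i : Nat) => (x - (i : Int) - 1, y))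
  let xacts : List String :=
    if dx > 0 then List.replicate dx.toNat "DOWN" else List.replicate (-dx).toNat "UP"
  let ycells : List (Int × Int) :=
    if dy > 0 then (List.range dy.toNat).map (fun (j : Nat) => (gx, y + (j : Int) + 1))
    else (List.range (-dy).toNat).map (fun (j : Nat) => (gx, y - (j : Int) - 1))
  let yacts : List String :=
    if dy > 0 then List.replicate dy.toNat "RIGHT" else List.replicate (-dy).toNat "LEFT"
  ([(x, y)] ++ xcells ++ ycells, xacts ++ yacts, (dx.natAbs : Int) + (dy.natAbs : Int))

-- ===== PRECONDITION & SPEC =====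
def Spec_move_towards_goal (start : Int × Int) (goal : Int × Int) (grid : Int × Int) (out : (List (Int × Int)) × List String × Int) : Prop := out = move_towards_goal_alt start goal grid
instance (start : Int × Int) (goal : Int × Int) (grid : Int × Int) (out : (List (Int × Int)) × List String × Int) : Decidable (Spec_move_towards_goal start goal grid out) := by unfold Spec_move_towards_goal; infer_instance

-- ===== CLAIM (what is proved, stated in full; the proofs are below) =====
def Claim_equal_move_towards_goal : Prop := ∀ (start : Int × Int) (goal : Int × Int) (grid : Int × Int), Dom_move_towards_goal start goal grid → Spec_move_towards_goal start goal grid (move_towards_goal start goal grid)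

-- ===== LEMMAS AND PROOFS =====

-- Proof-only helpers: the tail of cells / actions the loop will still produce from (x, y).
def pathSeg (gx gy x y : Int) : List (Int × Int) :=
  if x < gx then (x + 1, y) :: pathSeg gx gy (x + 1) y
  else if x > gx then (x - 1, y) :: pathSeg gx gy (x - 1) y
  else if y < gy then (x, y + 1) :: pathSeg gx gy x (y + 1)
  else if y > gy then (x, y - 1) :: pathSeg gx gy x (y - 1)
  else []
termination_by (gx - x).natAbs + (gy - y).natAbs
decreasing_by all_goals omega

def actSeg (gx gy x y : Int) : List String :=
  if x < gx then "DOWN" :: actSeg gx gy (x + 1) y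
  else if x > gx then "UP" :: actSeg gx gy (x - 1) y
  else if y < gy then "RIGHT" :: actSeg gx gy x (y + 1)
  else if y > gy then "LEFT" :: actSeg gx gy x (y - 1)
  else []
termination_by (gx - x).natAbs + (gy - y).natAbs
decreasing_by all_goals omega

lemma loop_eq_seg (n : Nat) : ∀ (gx gy x y : Int), (gx - x).natAbs + (gy - y).natAbs = n →
    ∀ (path : List (Int × Int)) (actions : List String) (cost : Int),
    move_towards_goal_loop n gx gy x y path actions cost =
      (path ++ pathSeg gx gy x y, actions ++ actSeg gx gy x y, cost + (n : Int)) := by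
  induction n with
  | zero =>
    intro gx gy x y hn path actions cost
    have hx : x = gx := by omega
    have hy : y = gy := by omega
    subst hx; subst hy
    rw [move_towards_goal_loop, pathSeg, actSeg]
    simp
  | succ n ih =>
    intro gx gy x y hn path actions cost
    have hgoal : (x, y) ≠ (gx, gy) := by
      simp only [ne_eq, Prod.mk.injEq, not_and]
      intro h1 h2; omega
    rw [move_towards_goal_loop, pathSeg, actSeg, if_pos hgoal]
    by_cases h1 : x < gx
    · rw [ih gx gy (x+1) y (by omega)]
      simp [h1]
      omega
    · by_cases h2 : x > gx
      · rw [ih gx gy (x-1) y (by omega)]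
        simp [h1, h2]
        omega
      · by_cases h3 : y < gy
        · rw [ih gx gy x (y+1) (by omega)]
          simp [h1, h2, h3]
          omega
        · have h4 : y > gy := by omega
          rw [ih gx gy x (y-1) (by omega)]
          simp [h1, h2, h3, h4]
          omega

-- x = gx case: pathSeg walks only y.
lemma pathSeg_y (m : Nat) : ∀ (gx gy y : Int), (gy - y).natAbs = m →
    pathSeg gx gy gx y =
      (if gy - y > 0 then (List.range (gy - y).toNat).map (fun (j : Nat) => (gx, y + (j : Int) + 1))
       else (List.range (y - gy).toNat).map (fun (j : Nat) => (gx, y - (j : Int) - 1))) := by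
  induction m using Nat.strong_induction_on with
  | _ m ih =>
    intro gx gy y hm
    rw [pathSeg]
    by_cases h3 : y < gy
    · rw [ih ((gy - (y+1)).natAbs) (by omega) gx gy (y+1) rfl]
      have hpos : gy - y > 0 := by omega
      have hpos' : (gy - y).toNat = ((gy - (y+1)).toNat + 1) := by omega
      simp only [lt_irrefl, if_false, if_pos h3, if_pos hpos]
      by_cases h3' : gy - (y+1) > 0
      · rw [if_pos h3', hpos', List.range_succ_eq_map, List.map_cons, List.map_map]
        congr 1
        · norm_num
        · apply List.map_congr_left; intro i _; simp only [Function.comp_apply, Prod.mk.injEq]; push_cast; constructor <;> first | trivial | ring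
      · have : gy - (y+1) = 0 := by omega
        rw [if_neg h3']
        have hz2 : (y+1) - gy = 0 := by omega
        simp [this, hpos', hz2]
    · by_cases h4 : y > gy
      · rw [ih ((gy - (y-1)).natAbs) (by omega) gx gy (y-1) rfl]
        have hneg : ¬(gy - y > 0) := by omega
        have hlen : (y - gy).toNat = (((y-1) - gy).toNat + 1) := by omega
        simp only [lt_irrefl, if_false, if_neg h3, if_pos h4, if_neg hneg]
        have h3' : ¬(gy - (y-1) > 0) := by omega
        rw [if_neg h3', hlen, List.range_succ_eq_map, List.map_cons, List.map_map]
        congr 1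
        · norm_num
        · apply List.map_congr_left; intro i _; simp only [Function.comp_apply, Prod.mk.injEq]; push_cast; constructor <;> first | trivial | ring
      · have h0 : y = gy := by omega
        simp [h0]

lemma pathSeg_eq (n : Nat) : ∀ (gx gy x y : Int), (gx - x).natAbs = n →
    pathSeg gx gy x y =
      (if gx - x > 0 then (List.range (gx - x).toNat).map (fun (i : Nat) => (x + (i : Int) + 1, y))
       else (List.range (x - gx).toNat).map (fun (i : Nat) => (x - (i : Int) - 1, y))) ++
      (if gy - y > 0 then (List.range (gy - y).toNat).map (fun (j : Nat) => (gx, y + (j : Int) + 1))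
       else (List.range (y - gy).toNat).map (fun (j : Nat) => (gx, y - (j : Int) - 1))) := by
  induction n using Nat.strong_induction_on with
  | _ n ih =>
    intro gx gy x y hn
    by_cases h1 : x < gx
    · rw [pathSeg, if_pos h1, ih ((gx - (x+1)).natAbs) (by omega) gx gy (x+1) y rfl]
      have hpos : gx - x > 0 := by omega
      have hlen : (gx - x).toNat = ((gx - (x+1)).toNat + 1) := by omega
      rw [if_pos hpos, hlen, List.range_succ_eq_map, List.map_cons, List.map_map, List.cons_append]
      congr 1
      · norm_num
      congr 1
      by_cases h1' : gx - (x+1) > 0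
      · rw [if_pos h1']
        apply List.map_congr_left; intro i _; simp only [Function.comp_apply, Prod.mk.injEq]; push_cast; constructor <;> first | trivial | ring
      · have hz : gx - (x+1) = 0 := by omega
        have hz' : (x+1) - gx = 0 := by omega
        rw [if_neg h1']; simp [hz']; omega
    · by_cases h2 : x > gx
      · rw [pathSeg, if_neg h1, if_pos h2, ih ((gx - (x-1)).natAbs) (by omega) gx gy (x-1) y rfl]
        have hneg : ¬(gx - x > 0) := by omega
        have hlen : (x - gx).toNat = (((x-1) - gx).toNat + 1) := by omega
        rw [if_neg hneg, hlen, List.range_succ_eq_map, List.map_cons, List.map_map, List.cons_append]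
        congr 1
        · push_cast; ring_nf
        congr 1
        have h1' : ¬(gx - (x-1) > 0) := by omega
        rw [if_neg h1']
        apply List.map_congr_left; intro i _; simp only [Function.comp_apply, Prod.mk.injEq]; push_cast; constructor <;> first | trivial | ring
      · have h0 : x = gx := by omega
        subst h0
        have hz : x - x = 0 := by omega
        rw [pathSeg_y ((gy - y).natAbs) x gy y rfl]
        simp [hz]

lemma actSeg_y (m : Nat) : ∀ (gx gy y : Int), (gy - y).natAbs = m →
    actSeg gx gy gx y =
      (if gy - y > 0 then List.replicate (gy - y).toNat "RIGHT"
       else List.replicate (y - gy).toNat "LEFT") := by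
  induction m using Nat.strong_induction_on with
  | _ m ih =>
    intro gx gy y hm
    rw [actSeg]
    by_cases h3 : y < gy
    · rw [ih ((gy - (y+1)).natAbs) (by omega) gx gy (y+1) rfl]
      have hpos : gy - y > 0 := by omega
      have hlen : (gy - y).toNat = ((gy - (y+1)).toNat + 1) := by omega
      simp only [lt_irrefl, if_false, if_pos h3, if_pos hpos]
      by_cases h3' : gy - (y+1) > 0
      · rw [if_pos h3', hlen, List.replicate_succ]
      · have hz : gy - (y+1) = 0 := by omega
        have hz' : (y+1) - gy = 0 := by omega
        rw [if_neg h3']; simp [hz, hz', hlen, List.replicate_succ]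
    · by_cases h4 : y > gy
      · rw [ih ((gy - (y-1)).natAbs) (by omega) gx gy (y-1) rfl]
        have hneg : ¬(gy - y > 0) := by omega
        have hlen : (y - gy).toNat = (((y-1) - gy).toNat + 1) := by omega
        have h3' : ¬(gy - (y-1) > 0) := by omega
        simp only [lt_irrefl, if_false, if_neg h3, if_pos h4, if_neg hneg, if_neg h3']
        rw [hlen, List.replicate_succ]
      · have h0 : y = gy := by omega
        simp [h0]

lemma actSeg_eq (n : Nat) : ∀ (gx gy x y : Int), (gx - x).natAbs = n →
    actSeg gx gy x y =
      (if gx - x > 0 then List.replicate (gx - x).toNat "DOWN"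
       else List.replicate (x - gx).toNat "UP") ++
      (if gy - y > 0 then List.replicate (gy - y).toNat "RIGHT"
       else List.replicate (y - gy).toNat "LEFT") := by
  induction n using Nat.strong_induction_on with
  | _ n ih =>
    intro gx gy x y hn
    by_cases h1 : x < gx
    · rw [actSeg, if_pos h1, ih ((gx - (x+1)).natAbs) (by omega) gx gy (x+1) y rfl]
      have hpos : gx - x > 0 := by omega
      have hlen : (gx - x).toNat = ((gx - (x+1)).toNat + 1) := by omega
      rw [if_pos hpos, hlen, List.replicate_succ, List.cons_append]
      congr 2
      by_cases h1' : gx - (x+1) > 0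
      · rw [if_pos h1']
      · have hz : gx - (x+1) = 0 := by omega
        have hz' : (x+1) - gx = 0 := by omega
        rw [if_neg h1']; simp [hz']; omega
    · by_cases h2 : x > gx
      · rw [actSeg, if_neg h1, if_pos h2, ih ((gx - (x-1)).natAbs) (by omega) gx gy (x-1) y rfl]
        have hneg : ¬(gx - x > 0) := by omega
        have hlen : (x - gx).toNat = (((x-1) - gx).toNat + 1) := by omega
        have h1' : ¬(gx - (x-1) > 0) := by omega
        rw [if_neg hneg, if_neg h1', hlen, List.replicate_succ, List.cons_append]
      · have h0 : x = gx := by omega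
        subst h0
        have hz : x - x = 0 := by omega
        rw [actSeg_y ((gy - y).natAbs) x gy y rfl]
        simp [hz]

-- ===== VERDICT (by name: the statement is the Claim_ definition above) =====
theorem move_towards_goal_spec : Claim_equal_move_towards_goal := by
  intro start goal grid _
  unfold Spec_move_towards_goal move_towards_goal move_towards_goal_alt
  rw [loop_eq_seg ((goal.1 - start.1).natAbs + (goal.2 - start.2).natAbs) goal.1 goal.2 start.1 start.2 rfl,
      pathSeg_eq ((goal.1 - start.1).natAbs) goal.1 goal.2 start.1 start.2 rfl,
      actSeg_eq ((goal.1 - start.1).natAbs) goal.1 goal.2 start.1 start.2 rfl]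
  simp
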